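-- pv_equiv track=rewrite | github.com/daniel-reich/ubiquitous-fiesta | SHdu4GwBQehhDm4xT_17.py | freed_prisoners
-- ===== SOURCE A (Python) =====
-- def freed_prisoners(prison):
--   if prison[0] == 0:
--     return 0
--   s, inv = 0, 0
--   for p in prison:
--     p = (p, not p)[inv]
--     if p:
--       s += 1
--       inv = not inv
--   return s
-- ===== SOURCE B (Python) =====
-- def freed_prisoners(prison):
--     if prison[0] == 0:
--         return 0
--     return 1 + sum((x != 0) != (y != 0) for x, y in zip(prison, prison[1:]))
-- ===== Notes on version B (the rewrite author's own statement) =====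
-- stated objective: idiomatic
-- what changed: Replaces the inversion-flag state machine with a stateless count of adjacent truthiness transitions (1 + number of neighbours whose zero/nonzero status differs).
import Mathlib
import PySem

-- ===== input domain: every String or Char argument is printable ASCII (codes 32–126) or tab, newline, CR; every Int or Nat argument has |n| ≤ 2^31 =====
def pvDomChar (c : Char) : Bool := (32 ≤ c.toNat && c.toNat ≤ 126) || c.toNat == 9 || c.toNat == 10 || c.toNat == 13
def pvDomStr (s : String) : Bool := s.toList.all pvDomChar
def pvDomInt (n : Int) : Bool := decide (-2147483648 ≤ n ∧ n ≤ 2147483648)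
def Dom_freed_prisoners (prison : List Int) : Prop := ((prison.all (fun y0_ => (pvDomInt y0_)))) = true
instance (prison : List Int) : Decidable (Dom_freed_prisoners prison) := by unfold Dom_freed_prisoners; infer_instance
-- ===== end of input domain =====

-- B replaces A's inversion-flag state machine by a stateless count of adjacent
-- truthiness transitions (idiomatic; same O(n) cost).

-- ===== PORT A =====
-- A's loop state is (s, inv); '(p, not p)[inv]' is truthy iff (p ≠ 0) differs from inv.
def freed_prisoners (prison : List Int) : Int :=
  if (prison.headD 1) == 0 then 0
  else
    (prison.foldl
      (fun (st : Int × Bool) p =>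
        let p' : Bool := if st.2 then p == 0 else p != 0
        if p' then (st.1 + 1, !st.2) else st)
      (0, false)).1

-- ===== PORT B =====
def freed_prisoners_alt (prison : List Int) : Int :=
  if (prison.headD 1) == 0 then 0
  else 1 + (((prison.zip prison.tail).filter
      (fun q => decide (q.1 ≠ 0) != decide (q.2 ≠ 0))).length : Int)

-- ===== PRECONDITION & SPEC =====
-- Pre_ excludes only the empty list, on which A (and B) raise IndexError at prison[0].
def Pre_freed_prisoners (prison : List Int) : Prop := prison ≠ []
instance (prison : List Int) : Decidable (Pre_freed_prisoners prison) := by unfold Pre_freed_prisoners; infer_instance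
def pvWitness_freed_prisoners : List Int := ([1, 0, 1])

def Spec_freed_prisoners (prison : List Int) (out : Int) : Prop := out = freed_prisoners_alt prison
instance (prison : List Int) (out : Int) : Decidable (Spec_freed_prisoners prison out) := by unfold Spec_freed_prisoners; infer_instance

-- ===== CLAIM (what is proved, stated in full; the proofs are below) =====
def Claim_equal_freed_prisoners : Prop := ∀ (prison : List Int), Dom_freed_prisoners prison → Pre_freed_prisoners prison → Spec_freed_prisoners prison (freed_prisoners prison)

-- ===== LEMMAS AND PROOFS =====

-- A's fold, as a standalone function of the state
def pvStep (st : Int × Bool) (p : Int) : Int × Bool :=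
  let p' : Bool := if st.2 then p == 0 else p != 0
  if p' then (st.1 + 1, !st.2) else st

-- transition count starting from a previous-truthiness flag b
def pvCnt (b : Bool) : List Int → Int
  | [] => 0
  | p :: t => (if decide (p ≠ 0) != b then 1 else 0) + pvCnt (decide (p ≠ 0)) t

lemma pvStep_eq (st : Int × Bool) (p : Int) :
    pvStep st p = (st.1 + (if decide (p ≠ 0) != st.2 then 1 else 0), decide (p ≠ 0)) := by
  rcases st with ⟨s, b⟩
  cases b <;> by_cases h : p = 0 <;> simp [pvStep, h]

lemma foldl_pvStep (l : List Int) (s : Int) (b : Bool) :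
    (l.foldl pvStep (s, b)).1 = s + pvCnt b l := by
  induction l generalizing s b with
  | nil => simp [pvCnt]
  | cons p t ih =>
      simp only [List.foldl_cons, pvStep_eq, pvCnt, ih]
      ring

lemma pvCnt_eq_filter (l : List Int) (x : Int) :
    pvCnt (decide (x ≠ 0)) l =
      ((((x :: l).zip l).filter (fun q => decide (q.1 ≠ 0) != decide (q.2 ≠ 0))).length : Int) := by
  induction l generalizing x with
  | nil => simp [pvCnt]
  | cons y t ih =>
      simp only [pvCnt, List.zip_cons_cons, List.filter_cons, ih y]
      by_cases hx : x = 0 <;> by_cases hy : y = 0 <;>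
        simp [hx, hy] <;> omega

-- ===== VERDICT (by name: the statement is the Claim_ definition above) =====
theorem freed_prisoners_spec : Claim_equal_freed_prisoners := by
  intro prison _ hpre
  unfold Spec_freed_prisoners freed_prisoners freed_prisoners_alt
  cases prison with
  | nil => exact absurd rfl hpre
  | cons x t =>
      by_cases hx : x = 0
      · simp [hx]
      · have hhead : ¬ (((x :: t).headD 1) == 0) = true := by simp [hx]
        simp only [hhead]
        show (List.foldl pvStep (0, false) (x :: t)).1 = _
        rw [foldl_pvStep]
        simp only [pvCnt, List.tail_cons]
        rw [pvCnt_eq_filter t x]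
        simp [hx]
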